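-- pv_equiv track=rewrite | github.com/Ewan-Reveille/propulse_rendu_stage | app.py | decompose_string
-- ===== SOURCE A (Python) =====
-- def decompose_string(input_string, word_list):
--     if not word_list:
--         return input_string
--
--     word_set = set(word_list)
--     max_len = max(len(word) for word in word_set)
--     result = []
--     unknown_buf = ""
--     i = 0
--     n = len(input_string)
--
--     while i < n:
--         found_word = None
--         start = min(n - i, max_len)
--
--         for length in range(start, 0, -1):
--             candidate = input_string[i:i + length]
--             if candidate in word_set:
--                 found_word = candidate
--                 break
--
--         if found_word:
--             if unknown_buf:
--                 result.append(unknown_buf)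
--                 unknown_buf = ""
--             result.append(found_word)
--             i += len(found_word)
--         else:
--             unknown_buf += input_string[i]
--             i += 1
--
--     if unknown_buf:
--         result.append(unknown_buf)
--
--     return " ".join(result)
-- ===== SOURCE B (Python) =====
-- def decompose_string(input_string, word_list):
--     if not word_list:
--         return input_string
--
--     # Build a trie of the words: each node is a dict from char to child node;
--     # the key '' marks that the path from the root spells a whole word.
--     root = {}
--     for word in word_list:
--         node = root
--         for ch in word:
--             if ch not in node:
--                 node[ch] = {}
--             node = node[ch]
--         node[''] = True
--
--     pieces = []
--     buf = []
--     i = 0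
--     n = len(input_string)
--     while i < n:
--         # one trie walk from position i finds the longest word starting there
--         node = root
--         best = 0
--         j = i
--         while j < n:
--             ch = input_string[j]
--             if ch not in node:
--                 break
--             node = node[ch]
--             j += 1
--             if '' in node:
--                 best = j - i
--         if best:
--             if buf:
--                 pieces.append("".join(buf))
--                 buf = []
--             pieces.append(input_string[i:i + best])
--             i += best
--         else:
--             buf.append(input_string[i])
--             i += 1
--     if buf:
--         pieces.append("".join(buf))
--     return " ".join(pieces)
-- ===== Notes on version B (the rewrite author's own statement) =====
-- stated objective: alternative
-- what changed: A re-slices the input and probes the word set once per candidate length at every position; B builds a trie of the words once and finds the longest match at each position with a single child-by-child trie walk, trading per-length slicing and set probes for per-character trie steps.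
import Mathlib
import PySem

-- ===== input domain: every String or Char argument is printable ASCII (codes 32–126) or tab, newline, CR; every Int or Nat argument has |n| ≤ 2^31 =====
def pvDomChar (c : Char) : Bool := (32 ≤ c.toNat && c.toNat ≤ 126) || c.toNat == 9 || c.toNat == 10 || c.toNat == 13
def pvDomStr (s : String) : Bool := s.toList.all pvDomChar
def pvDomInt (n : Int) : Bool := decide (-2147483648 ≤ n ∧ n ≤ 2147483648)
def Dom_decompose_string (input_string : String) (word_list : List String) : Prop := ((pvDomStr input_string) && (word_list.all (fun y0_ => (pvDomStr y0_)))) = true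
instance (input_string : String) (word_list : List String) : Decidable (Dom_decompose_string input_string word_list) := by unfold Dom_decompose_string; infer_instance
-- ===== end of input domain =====

-- B replaces A's per-position descending scan over candidate lengths (slice + set lookup
-- for each length) by a single child-by-child trie walk per position; objective: alternative.

-- ===== PORT A =====
-- for length in range(start, 0, -1): candidate = s[i:i+length]; if candidate in word_set: …
def dsA_find (wset : PySem.Set (List Char)) (rem : List Char) : Nat → Option (List Char)
  | 0 => none
  | l + 1 =>
      let candidate := rem.take (l + 1)
      if PySem.Set.contains wset candidate then some candidate else dsA_find wset rem l

-- any word dsA_find returns is a nonempty prefix of rem (cited by dsA_loop's decreasing_by)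
theorem dsA_find_pos (wset : PySem.Set (List Char)) (rem : List Char) (l : Nat) (w : List Char)
    (hrem : rem ≠ []) (h : dsA_find wset rem l = some w) : 0 < w.length := by
  induction l with
  | zero => simp [dsA_find] at h
  | succ l ih =>
      simp only [dsA_find] at h
      split at h
      · cases h; cases rem with
        | nil => exact absurd rfl hrem
        | cons c t => simp
      · exact ih h

-- the while-loop of A: rem = input_string[i:], res = result, buf = unknown_buf
def dsA_loop (wset : PySem.Set (List Char)) (maxLen : Nat) :
    List Char → List (List Char) → List Char → List (List Char)
  | [], res, buf => if buf = [] then res else res ++ [buf]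
  | c :: rest, res, buf =>
      let rem := c :: rest
      let start := min rem.length maxLen
      match h : dsA_find wset rem start with
      | some w =>
          let res' := if buf = [] then res ++ [w] else res ++ [buf, w]
          dsA_loop wset maxLen (rem.drop w.length) res' []
      | none => dsA_loop wset maxLen rest res (buf ++ [c])
  termination_by rem _ _ => rem.length
  decreasing_by
  · have hw := dsA_find_pos wset (c :: rest) _ w (by simp) h
    simp only [List.length_drop, List.length_cons]
    omega
  · simp

def decompose_string (input_string : String) (word_list : List String) : String :=
  if word_list = [] then input_string
  else
    let wset : PySem.Set (List Char) := PySem.Set.ofList (word_list.map String.toList)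
    let maxLen := (PySem.List.max? (wset.map List.length) (fun x => x)).getD 0
    String.ofList (PySem.Chars.join [' '] (dsA_loop wset maxLen input_string.toList [] []))

-- ===== PORT B =====
-- a trie node: end-of-word flag + children (explicit child list, no nesting)
mutual
inductive PTrie where
  | mk : Bool → PKids → PTrie
  deriving Repr
inductive PKids where
  | nil : PKids
  | cons : Char → PTrie → PKids → PKids
  deriving Repr
end

def PTrie.flag : PTrie → Bool | .mk b _ => b
def PTrie.kids : PTrie → PKids | .mk _ k => k

-- children lookup: node[ch] / ch in node
def PKids.find? : PKids → Char → Option PTrie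
  | .nil, _ => none
  | .cons c t rest, ch => if c = ch then some t else PKids.find? rest ch

-- inserting one word into the trie (the inner for-loop of B's build phase)
mutual
def PTrie.insert : PTrie → List Char → PTrie
  | .mk _ k, [] => .mk true k
  | .mk b k, c :: cs => .mk b (PKids.insertAt k c cs)
  termination_by _ w => (w.length, 0)
def PKids.insertAt : PKids → Char → List Char → PKids
  | .nil, c, cs => .cons c (PTrie.insert (.mk false .nil) cs) .nil
  | .cons c' t rest, c, cs =>
      if c' = c then .cons c' (PTrie.insert t cs) rest
      else .cons c' t (PKids.insertAt rest c cs)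
  termination_by k _ cs => (cs.length, 1 + sizeOf k)
end

-- for word in word_list: insert it
def buildTrie (ws : List (List Char)) : PTrie :=
  ws.foldl PTrie.insert (.mk false .nil)

-- the inner while-loop of B: walk the trie along rem, remembering the longest end-of-word depth
def dsB_walk : PTrie → List Char → Nat → Nat → Nat
  | _, [], _, best => best
  | t, c :: rest, steps, best =>
      match PKids.find? t.kids c with
      | none => best
      | some t' => dsB_walk t' rest (steps + 1) (if t'.flag then steps + 1 else best)

-- the outer while-loop of B
def dsB_loop (root : PTrie) : List Char → List (List Char) → List Char → List (List Char)
  | [], pieces, buf => if buf = [] then pieces else pieces ++ [buf]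
  | c :: rest, pieces, buf =>
      let rem := c :: rest
      let best := dsB_walk root rem 0 0
      if h : best ≠ 0 then
        let pieces' := if buf = [] then pieces ++ [rem.take best] else pieces ++ [buf, rem.take best]
        dsB_loop root (rem.drop best) pieces' []
      else dsB_loop root rest pieces (buf ++ [c])
  termination_by rem _ _ => rem.length
  decreasing_by
  · have h2 : dsB_walk root (c :: rest) 0 0 ≠ 0 := h
    simp only [List.length_drop, List.length_cons]
    omega
  · simp

def decompose_string_alt (input_string : String) (word_list : List String) : String :=
  if word_list = [] then input_string
  else
    let root := buildTrie (word_list.map String.toList)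
    String.ofList (PySem.Chars.join [' '] (dsB_loop root input_string.toList [] []))

-- ===== PRECONDITION & SPEC =====
def Spec_decompose_string (input_string : String) (word_list : List String) (out : String) : Prop := out = decompose_string_alt input_string word_list
instance (input_string : String) (word_list : List String) (out : String) : Decidable (Spec_decompose_string input_string word_list out) := by unfold Spec_decompose_string; infer_instance

-- ===== CLAIM (what is proved, stated in full; the proofs are below) =====
def Claim_equal_decompose_string : Prop := ∀ (input_string : String) (word_list : List String), Dom_decompose_string input_string word_list → Spec_decompose_string input_string word_list (decompose_string input_string word_list)

-- ===== LEMMAS AND PROOFS =====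

-- trie membership: does the trie contain this word?
def PTrie.containsW : PTrie → List Char → Bool
  | t, [] => t.flag
  | t, c :: cs =>
      match PKids.find? t.kids c with
      | none => false
      | some t' => PTrie.containsW t' cs

-- the longest m with 1 ≤ m ≤ rem.length and t.containsW (rem.take m), else 0
def bestLen : PTrie → List Char → Nat
  | _, [] => 0
  | t, c :: rest =>
      match PKids.find? t.kids c with
      | none => 0
      | some t' =>
          let b := bestLen t' rest
          if b ≠ 0 then b + 1 else if t'.flag then 1 else 0

theorem find?_insertAt (k : PKids) (c : Char) (cs : List Char) (d : Char) :
    PKids.find? (PKids.insertAt k c cs) d =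
      if c = d then some (PTrie.insert ((PKids.find? k c).getD (.mk false .nil)) cs)
      else PKids.find? k d := by
  cases k with
  | nil => by_cases hcd : c = d <;> simp [PKids.insertAt, PKids.find?, hcd]
  | cons c' t rest =>
      have ih := find?_insertAt rest c cs d
      by_cases h1 : c' = c
      · subst h1
        by_cases hcd : c' = d <;> simp [PKids.insertAt, PKids.find?, hcd]
      · have h1' : ¬ (c = c') := fun h => h1 h.symm
        by_cases hcd : c' = d
        · subst hcd
          simp [PKids.insertAt, h1, PKids.find?, h1']
        · simp [PKids.insertAt, PKids.find?, h1, hcd, ih]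
  termination_by sizeOf k
  decreasing_by simp

theorem containsW_empty (v : List Char) : PTrie.containsW (.mk false .nil) v = false := by
  cases v <;> simp [PTrie.containsW, PTrie.flag, PTrie.kids, PKids.find?]

theorem containsW_insert (w : List Char) : ∀ (t : PTrie) (v : List Char),
    PTrie.containsW (PTrie.insert t w) v = (PTrie.containsW t v || v == w) := by
  induction w with
  | nil =>
      intro t v
      cases t with | mk b k =>
      cases v with
      | nil => simp [PTrie.insert, PTrie.containsW, PTrie.flag]
      | cons d ds => simp [PTrie.insert, PTrie.containsW, PTrie.kids]
  | cons c cs ih =>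
      intro t v
      cases t with | mk b k =>
      cases v with
      | nil => simp [PTrie.insert, PTrie.containsW, PTrie.flag]
      | cons d ds =>
          simp only [PTrie.insert, PTrie.containsW, PTrie.kids, find?_insertAt]
          by_cases hcd : c = d
          · subst hcd
            cases hk : PKids.find? k c with
            | none =>
                simp [ih, containsW_empty]
            | some t' =>
                simp [ih]
          · have hdc : ((d :: ds) == (c :: cs)) = false := by
              simp only [List.cons_beq_cons, Bool.and_eq_false_iff]
              exact Or.inl (by simpa using fun h : d = c => hcd h.symm)
            cases hk : PKids.find? k d <;> simp [hdc, hcd]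

theorem containsW_buildTrie (ws : List (List Char)) (v : List Char) :
    PTrie.containsW (buildTrie ws) v = decide (v ∈ ws) := by
  suffices h : ∀ (t : PTrie), PTrie.containsW (ws.foldl PTrie.insert t) v
      = (PTrie.containsW t v || decide (v ∈ ws)) by
    simpa [buildTrie, containsW_empty] using h (.mk false .nil)
  induction ws with
  | nil => simp
  | cons w ws ih =>
      intro t
      simp only [List.foldl_cons, ih, containsW_insert, List.mem_cons]
      by_cases hvw : v = w <;> simp [hvw, Bool.or_comm, Bool.or_left_comm]

theorem bestLen_le (t : PTrie) (rem : List Char) : bestLen t rem ≤ rem.length := by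
  induction rem generalizing t with
  | nil => simp [bestLen]
  | cons c rest ih =>
      simp only [bestLen]
      cases h : PKids.find? t.kids c with
      | none => simp
      | some t' =>
          have := ih t'
          simp only [List.length_cons]
          split_ifs <;> omega

theorem bestLen_contains (t : PTrie) (rem : List Char) (h : bestLen t rem ≠ 0) :
    PTrie.containsW t (rem.take (bestLen t rem)) = true := by
  induction rem generalizing t with
  | nil => simp [bestLen] at h
  | cons c rest ih =>
      simp only [bestLen] at h ⊢
      cases hk : PKids.find? t.kids c with
      | none => simp [hk] at h
      | some t' =>
          simp only [hk] at h ⊢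
          by_cases hb : bestLen t' rest ≠ 0
          · rw [if_pos hb]
            simp [List.take_succ_cons, PTrie.containsW, hk, ih t' hb]
          · rw [if_neg hb] at h ⊢
            by_cases hf : t'.flag
            · rw [if_pos hf]
              simp [List.take_succ_cons, PTrie.containsW, hk, hf]
            · rw [if_neg hf] at h
              exact absurd rfl h

theorem bestLen_max (t : PTrie) (rem : List Char) (m : Nat)
    (h1 : bestLen t rem < m) (h2 : m ≤ rem.length) :
    PTrie.containsW t (rem.take m) = false := by
  induction rem generalizing t m with
  | nil => simp at h2; omega
  | cons c rest ih =>
      cases m with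
      | zero => omega
      | succ m' =>
          simp only [bestLen] at h1
          simp only [List.take_succ_cons, PTrie.containsW]
          cases hk : PKids.find? t.kids c with
          | none => rfl
          | some t' =>
              simp only [hk] at h1 ⊢
              simp only [List.length_cons] at h2
              by_cases hb : bestLen t' rest ≠ 0
              · rw [if_pos hb] at h1
                exact ih t' m' (by omega) (by omega)
              · rw [if_neg hb] at h1
                cases m' with
                | zero =>
                    simp only [List.take_zero, PTrie.containsW]
                    by_cases hf : t'.flag
                    · rw [if_pos hf] at h1; omega
                    · simpa using hf
                | succ m'' => exact ih t' (m'' + 1) (by omega) (by omega)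

-- the trie walk computes bestLen (shifted by the accumulator)
theorem dsB_walk_eq (t : PTrie) (rem : List Char) (steps best : Nat) :
    dsB_walk t rem steps best = if bestLen t rem = 0 then best else steps + bestLen t rem := by
  induction rem generalizing t steps best with
  | nil => simp [dsB_walk, bestLen]
  | cons c rest ih =>
      simp only [dsB_walk, bestLen]
      cases hk : PKids.find? t.kids c with
      | none => simp
      | some t' =>
          simp only [hk]
          rw [ih]
          by_cases hf : t'.flag <;> by_cases hb : bestLen t' rest = 0 <;>
            simp [hf, hb] <;> omega

-- A's descending scan returns exactly the bestLen-prefix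
theorem dsA_find_eq (wset : PySem.Set (List Char)) (rem : List Char) (b : Nat)
    (hble : b ≤ rem.length)
    (hmem : b ≠ 0 → PySem.Set.contains wset (rem.take b) = true)
    (hmax : ∀ m, b < m → m ≤ rem.length → PySem.Set.contains wset (rem.take m) = false) :
    ∀ start, b ≤ start → start ≤ rem.length →
      dsA_find wset rem start = if b = 0 then none else some (rem.take b) := by
  intro start
  induction start with
  | zero =>
      intro h1 _
      have : b = 0 := by omega
      simp [dsA_find, this]
  | succ l ih =>
      intro h1 h2
      by_cases hb : b = l + 1
      · subst hb
        simp [dsA_find]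
        intro hn
        exact absurd ((PySem.Set.contains_iff _ _).mp (hmem (by omega))) hn
      · have hne := hmax (l + 1) (by omega) h2
        have hnm : List.take (l + 1) rem ∉ wset := by
          intro hm
          have hc := (PySem.Set.contains_iff wset (List.take (l + 1) rem)).mpr hm
          rw [hc] at hne
          simp at hne
        simp only [dsA_find]
        rw [if_neg (fun h => hnm ((PySem.Set.contains_iff _ _).mp h))]
        exact ih (by omega) (by omega)

-- both outer loops agree, given that the trie represents exactly the word set
theorem loops_eq (wset : PySem.Set (List Char)) (maxLen : Nat) (root : PTrie)
    (hmem : ∀ v, PySem.Set.contains wset v = PTrie.containsW root v)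
    (hmax : ∀ v, PySem.Set.contains wset v = true → v.length ≤ maxLen)
    (rem : List Char) (res : List (List Char)) (buf : List Char) :
    dsA_loop wset maxLen rem res buf = dsB_loop root rem res buf := by
  cases rem with
  | nil => simp [dsA_loop, dsB_loop]
  | cons c rest =>
      have hble : bestLen root (c :: rest) ≤ (c :: rest).length := bestLen_le root (c :: rest)
      have hbmax : bestLen root (c :: rest) ≠ 0 → bestLen root (c :: rest) ≤ maxLen := by
        intro h
        have h1 : PySem.Set.contains wset ((c :: rest).take (bestLen root (c :: rest))) = true := by
          rw [hmem]; exact bestLen_contains root (c :: rest) h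
        have h2 := hmax _ h1
        simp only [List.length_take] at h2
        omega
      have hfind : dsA_find wset (c :: rest) (min (c :: rest).length maxLen)
          = if bestLen root (c :: rest) = 0 then none
            else some ((c :: rest).take (bestLen root (c :: rest))) := by
        refine dsA_find_eq wset (c :: rest) (bestLen root (c :: rest)) hble
          (fun h => by rw [hmem]; exact bestLen_contains root (c :: rest) h)
          (fun m hm1 hm2 => by rw [hmem]; exact bestLen_max root (c :: rest) m hm1 hm2)
          (min (c :: rest).length maxLen) ?_ (Nat.min_le_left _ _)
        by_cases h : bestLen root (c :: rest) = 0
        · omega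
        · exact le_min hble (hbmax h)
      have hwalk : dsB_walk root (c :: rest) 0 0 = bestLen root (c :: rest) := by
        rw [dsB_walk_eq]
        by_cases h : bestLen root (c :: rest) = 0 <;> simp [h]
      rw [dsA_loop, dsB_loop]
      simp only [hwalk]
      split
      · rename_i w heq
        rw [hfind] at heq
        by_cases hb0 : bestLen root (c :: rest) = 0
        · rw [if_pos hb0] at heq; exact absurd heq (by simp)
        · rw [if_neg hb0] at heq
          have hw : w = (c :: rest).take (bestLen root (c :: rest)) := (Option.some.inj heq).symm
          have hwlen : w.length = bestLen root (c :: rest) := by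
            rw [hw]; simp only [List.length_take]; omega
          rw [dif_pos hb0, hwlen, hw]
          exact loops_eq wset maxLen root hmem hmax _ _ _
      · rename_i heq
        rw [hfind] at heq
        by_cases hb0 : bestLen root (c :: rest) = 0
        · rw [dif_neg (by omega)]
          exact loops_eq wset maxLen root hmem hmax _ _ _
        · rw [if_neg hb0] at heq; exact absurd heq (by simp)
  termination_by rem.length
  decreasing_by
  · have h1 : bestLen root (c :: rest) ≠ 0 := hb0
    simp only [List.length_drop, List.length_cons]
    omega
  · simp

-- ===== VERDICT (by name: the statement is the Claim_ definition above) =====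
theorem decompose_string_spec : Claim_equal_decompose_string := by
  unfold Claim_equal_decompose_string Spec_decompose_string
  intro input_string word_list _
  unfold decompose_string decompose_string_alt
  by_cases hwl : word_list = []
  · simp [hwl]
  · simp only [if_neg hwl]
    have hne : (word_list.map String.toList) ≠ [] := by simp [hwl]
    have hmax : ∀ v, PySem.Set.contains (PySem.Set.ofList (word_list.map String.toList)) v = true →
        v.length ≤ (PySem.List.max?
          ((PySem.Set.ofList (word_list.map String.toList)).map List.length) (fun x => x)).getD 0 := by
      intro v hv
      have hv' : v ∈ PySem.Set.ofList (word_list.map String.toList) :=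
        (PySem.Set.contains_iff _ _).mp hv
      have hvl : v.length ∈ (PySem.Set.ofList (word_list.map String.toList)).map List.length :=
        List.mem_map_of_mem hv'
      cases hm : PySem.List.max?
          ((PySem.Set.ofList (word_list.map String.toList)).map List.length) (fun x => x) with
      | none =>
          rw [PySem.List.max?_eq_none_iff] at hm
          rw [hm] at hvl
          simp at hvl
      | some m =>
          have := PySem.List.max?_isMax hm _ hvl
          simpa using this
    have hmem : ∀ v, PySem.Set.contains (PySem.Set.ofList (word_list.map String.toList)) v
        = PTrie.containsW (buildTrie (word_list.map String.toList)) v := by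
      intro v
      rw [containsW_buildTrie]
      by_cases hv : v ∈ word_list.map String.toList
      · simp [hv]
      · have hnm : ¬ v ∈ PySem.Set.ofList (word_list.map String.toList) := by
          rw [PySem.Set.mem_ofList]; exact hv
        simp [hv, hnm]
    rw [loops_eq _ _ _ hmem hmax]
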